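-- pv_equiv track=rewrite | github.com/Grischaa/Scouting_ML | src/scouting_ml/pipeline_tm.py | _map_position_group
-- ===== SOURCE A (Python) =====
-- def _map_position_group(pos: str | None) -> str | None:
--     if not isinstance(pos, str):
--         return None
--     p = pos.lower()
--     if "torwart" in p or "goalkeeper" in p: return "GK"
--     if any(k in p for k in ["innenverteidiger","verteidiger","centre-back","center-back","full-back","right-back","left-back","defender"]): return "DF"
--     if any(k in p for k in ["mittelfeld","midfield","winger","flügel"]): return "MF"
--     if any(k in p for k in ["sturm","stürmer","forward","striker","centre-forward","center-forward"]): return "FW"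
--     return None
-- ===== SOURCE B (Python) =====
-- # B: instead of checking group branches in priority order with early return,
-- # scan all keywords in alphabetical order, keep the best (lowest) priority
-- # rank among every matching keyword, and map the rank back to its group code.
-- _KEYWORD_CODE = {
--     "torwart": "GK", "goalkeeper": "GK",
--     "innenverteidiger": "DF", "verteidiger": "DF", "centre-back": "DF",
--     "center-back": "DF", "full-back": "DF", "right-back": "DF",
--     "left-back": "DF", "defender": "DF",
--     "mittelfeld": "MF", "midfield": "MF", "winger": "MF", "fl\u00fcgel": "MF",
--     "sturm": "FW", "st\u00fcrmer": "FW", "forward": "FW", "striker": "FW",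
--     "centre-forward": "FW", "center-forward": "FW",
-- }
-- _RANK = {"GK": 0, "DF": 1, "MF": 2, "FW": 3}
-- _CODES = ["GK", "DF", "MF", "FW"]
--
-- def _map_position_group(pos):
--     if not isinstance(pos, str):
--         return None
--     p = pos.lower()
--     best = None
--     for kw in sorted(_KEYWORD_CODE):
--         if kw in p:
--             r = _RANK[_KEYWORD_CODE[kw]]
--             if best is None or r < best:
--                 best = r
--     return _CODES[best] if best is not None else None
-- ===== Notes on version B (the rewrite author's own statement) =====
-- stated objective: alternative
-- what changed: B drops the priority-ordered branch chain with early return: it scans every keyword in alphabetical order, keeps the minimum group-priority rank among all matching keywords, and maps that rank back to the group code at the end; correct because taking the minimum rank over all matches equals returning the first matching group in priority order.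
import Mathlib
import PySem

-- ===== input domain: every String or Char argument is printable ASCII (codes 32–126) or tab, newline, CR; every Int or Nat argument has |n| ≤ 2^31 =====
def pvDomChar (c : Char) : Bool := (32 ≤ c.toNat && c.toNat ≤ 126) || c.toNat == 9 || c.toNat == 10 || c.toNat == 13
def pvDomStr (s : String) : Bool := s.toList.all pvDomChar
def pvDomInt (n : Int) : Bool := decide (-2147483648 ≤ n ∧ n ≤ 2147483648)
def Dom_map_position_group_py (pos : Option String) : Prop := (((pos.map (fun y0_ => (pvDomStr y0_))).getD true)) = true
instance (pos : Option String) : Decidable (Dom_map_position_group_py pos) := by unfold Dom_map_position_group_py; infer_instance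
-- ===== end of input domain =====

-- B replaces A's priority-ordered branch chain with early return by a single alphabetical
-- scan over all keywords that keeps the minimum group-priority rank among matches and maps
-- the rank back to a code at the end; objective: alternative (same cost).

-- ===== PORT A =====
-- literal transliteration of A: lowercase, then four branch checks in order
def map_position_group_py (pos : Option String) : Option String :=
  match pos with
  | none => none
  | some s =>
    let p := PySem.Str.lower s
    if PySem.Str.isIn "torwart" p || PySem.Str.isIn "goalkeeper" p then some "GK"
    else if (["innenverteidiger","verteidiger","centre-back","center-back","full-back","right-back","left-back","defender"].any (fun k => PySem.Str.isIn k p)) then some "DF"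
    else if (["mittelfeld","midfield","winger","flügel"].any (fun k => PySem.Str.isIn k p)) then some "MF"
    else if (["sturm","stürmer","forward","striker","centre-forward","center-forward"].any (fun k => PySem.Str.isIn k p)) then some "FW"
    else none

-- ===== PORT B =====
-- B's keyword → group-code dict (insertion order as in Source B)
def pvKeywordCode : PySem.Dict String String := PySem.Dict.ofList
  [("torwart", "GK"), ("goalkeeper", "GK"),
   ("innenverteidiger", "DF"), ("verteidiger", "DF"), ("centre-back", "DF"),
   ("center-back", "DF"), ("full-back", "DF"), ("right-back", "DF"),
   ("left-back", "DF"), ("defender", "DF"),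
   ("mittelfeld", "MF"), ("midfield", "MF"), ("winger", "MF"), ("flügel", "MF"),
   ("sturm", "FW"), ("stürmer", "FW"), ("forward", "FW"), ("striker", "FW"),
   ("centre-forward", "FW"), ("center-forward", "FW")]

def pvRank : PySem.Dict String Int := PySem.Dict.ofList [("GK", 0), ("DF", 1), ("MF", 2), ("FW", 3)]

def pvCodes : List String := ["GK", "DF", "MF", "FW"]

-- one iteration of Source B's loop body: keep the smaller rank (dict lookups never miss on Source B's data;
-- getD's defaults are unreachable)
def pvStep (p : String) (best : Option Int) (kw : String) : Option Int :=
  if PySem.Str.isIn kw p then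
    let r : Int := pvRank.getD (pvKeywordCode.getD kw "") 100
    match best with
    | none => some r
    | some b => if r < b then some r else best
  else best

def map_position_group_py_alt (pos : Option String) : Option String :=
  match pos with
  | none => none
  | some s =>
    let p := PySem.Str.lower s
    match (PySem.List.sorted pvKeywordCode.keys (fun k => k) false).foldl (pvStep p) none with
    | none => none
    | some b => PySem.List.pyGet? pvCodes b   -- _CODES[best]; none would be Python's IndexError (unreachable: b ∈ {0,1,2,3})

-- ===== PRECONDITION & SPEC =====
def Spec_map_position_group_py (pos : Option String) (out : Option String) : Prop := out = map_position_group_py_alt pos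
instance (pos : Option String) (out : Option String) : Decidable (Spec_map_position_group_py pos out) := by unfold Spec_map_position_group_py; infer_instance

-- ===== CLAIM (what is proved, stated in full; the proofs are below) =====
def Claim_equal_map_position_group_py : Prop := ∀ (pos : Option String), Dom_map_position_group_py pos → Spec_map_position_group_py pos (map_position_group_py pos)

-- ===== LEMMAS AND PROOFS =====

-- min of two optional ranks (none = "no match yet")
def pvOmin : Option Int → Option Int → Option Int
  | none, y => y
  | some a, none => some a
  | some a, some b => some (min a b)

def pvRankOf (kw : String) : Int := pvRank.getD (pvKeywordCode.getD kw "") 100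

-- minimum rank among keywords of ks matching p, folded onto m
def pvM (p : String) (ks : List String) (m : Option Int) : Option Int :=
  ks.foldr (fun kw acc => if PySem.Str.isIn kw p then pvOmin (some (pvRankOf kw)) acc else acc) m

theorem pvOmin_assoc (x y z : Option Int) : pvOmin (pvOmin x y) z = pvOmin x (pvOmin y z) := by
  cases x <;> cases y <;> cases z <;> simp [pvOmin, min_assoc]

theorem pvStep_eq (p : String) (acc : Option Int) (kw : String) :
    pvStep p acc kw = pvOmin acc (if PySem.Str.isIn kw p then some (pvRankOf kw) else none) := by
  unfold pvStep pvRankOf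
  cases h : PySem.Str.isIn kw p
  · rw [if_neg (by simp), if_neg (by simp)]
    cases acc <;> rfl
  · rw [if_pos rfl, if_pos rfl]
    cases acc with
    | none => rfl
    | some b =>
      show (if _ < b then _ else _) = pvOmin (some b) (some _)
      simp only [pvOmin]
      split_ifs with h2 <;> congr 1 <;> omega

-- Source B's fold computes the pvOmin of the accumulator with the minimum matched rank
theorem pvFold_eq (p : String) (ks : List String) (acc : Option Int) :
    ks.foldl (pvStep p) acc = pvOmin acc (pvM p ks none) := by
  induction ks generalizing acc with
  | nil => cases acc <;> simp [pvM, pvOmin]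
  | cons kw ks ih =>
    simp only [List.foldl_cons, ih, pvStep_eq, pvM, List.foldr_cons]
    by_cases h : PySem.Str.isIn kw p
    · simp only [h, if_true, pvOmin_assoc]
    · simp only [h]
      cases acc <;> simp [pvOmin]

-- pvM is invariant under permutation of the keyword list (pvOmin is commutative/associative)
theorem pvM_perm (p : String) {l1 l2 : List String} (h : l1.Perm l2) (m : Option Int) :
    pvM p l1 m = pvM p l2 m := by
  refine @List.Perm.foldr_eq _ _ _ l1 l2 ⟨?_⟩ h m
  intro a b c
  by_cases ha : PySem.Str.isIn a p <;> by_cases hb : PySem.Str.isIn b p <;>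
    simp only [ha, hb, if_true] <;>
    cases c <;> simp [pvOmin, min_comm, min_left_comm]

-- pvM over a block of keywords that all carry the same rank r
theorem pvM_const (p : String) (ks : List String) (r : Int)
    (h : ∀ kw ∈ ks, pvRankOf kw = r) (m : Option Int) :
    pvM p ks m = if ks.any (fun kw => PySem.Str.isIn kw p) then pvOmin (some r) m else m := by
  induction ks with
  | nil => simp [pvM]
  | cons kw ks ih =>
    have hkw : pvRankOf kw = r := h kw (List.mem_cons_self ..)
    have ih' := ih (fun k hk => h k (List.mem_cons_of_mem _ hk))
    simp only [pvM, List.foldr_cons] at ih' ⊢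
    rw [ih', List.any_cons]
    cases h1 : PySem.Str.isIn kw p
    · simp
    · simp only [Bool.true_or, hkw]
      by_cases h2 : (ks.any (fun kw => PySem.Str.isIn kw p)) = true
      · rw [if_pos h2]
        cases m <;> simp [pvOmin, min_self]
      · rw [if_neg h2]

theorem pvM_append (p : String) (l1 l2 : List String) (m : Option Int) :
    pvM p (l1 ++ l2) m = pvM p l1 (pvM p l2 m) := List.foldr_append ..

-- the dict's keys are a permutation of the keys grouped by rank (GK, DF, MF, FW blocks in A's order);
-- with sorted_perm this makes the alphabetical iteration order irrelevant to pvM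
theorem pv_perm_grouped :
    pvKeywordCode.keys.Perm
      (["torwart", "goalkeeper"] ++
       (["innenverteidiger","verteidiger","centre-back","center-back","full-back","right-back","left-back","defender"] ++
        (["mittelfeld","midfield","winger","flügel"] ++
         ["sturm","stürmer","forward","striker","centre-forward","center-forward"]))) := by decide

-- ===== VERDICT (by name: the statement is the Claim_ definition above) =====
theorem map_position_group_py_spec : Claim_equal_map_position_group_py := by
  intro pos _
  unfold Spec_map_position_group_py
  cases pos with
  | none => rfl
  | some s =>
    simp only [map_position_group_py, map_position_group_py_alt]
    rw [pvFold_eq,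
        pvM_perm _ ((PySem.List.sorted_perm pvKeywordCode.keys (fun k => k) false).trans pv_perm_grouped),
        pvM_append, pvM_append, pvM_append,
        pvM_const _ (["sturm","stürmer","forward","striker","centre-forward","center-forward"]) 3 (by decide),
        pvM_const _ (["mittelfeld","midfield","winger","flügel"]) 2 (by decide),
        pvM_const _ (["innenverteidiger","verteidiger","centre-back","center-back","full-back","right-back","left-back","defender"]) 1 (by decide),
        pvM_const _ (["torwart", "goalkeeper"]) 0 (by decide)]
    simp only [List.any_cons, List.any_nil, Bool.or_false]
    cases hg : (PySem.Str.isIn "torwart" (PySem.Str.lower s) || PySem.Str.isIn "goalkeeper" (PySem.Str.lower s)) <;>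
    cases hd : (PySem.Str.isIn "innenverteidiger" (PySem.Str.lower s) || (PySem.Str.isIn "verteidiger" (PySem.Str.lower s) || (PySem.Str.isIn "centre-back" (PySem.Str.lower s) || (PySem.Str.isIn "center-back" (PySem.Str.lower s) || (PySem.Str.isIn "full-back" (PySem.Str.lower s) || (PySem.Str.isIn "right-back" (PySem.Str.lower s) || (PySem.Str.isIn "left-back" (PySem.Str.lower s) || PySem.Str.isIn "defender" (PySem.Str.lower s)))))))) <;>
    cases hm : (PySem.Str.isIn "mittelfeld" (PySem.Str.lower s) || (PySem.Str.isIn "midfield" (PySem.Str.lower s) || (PySem.Str.isIn "winger" (PySem.Str.lower s) || PySem.Str.isIn "flügel" (PySem.Str.lower s)))) <;>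
    cases hf : (PySem.Str.isIn "sturm" (PySem.Str.lower s) || (PySem.Str.isIn "stürmer" (PySem.Str.lower s) || (PySem.Str.isIn "forward" (PySem.Str.lower s) || (PySem.Str.isIn "striker" (PySem.Str.lower s) || (PySem.Str.isIn "centre-forward" (PySem.Str.lower s) || PySem.Str.isIn "center-forward" (PySem.Str.lower s)))))) <;>
      rfl
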